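-- pv_equiv track=rewrite | github.com/MrBrantCode/unitest_baseline | mut_generate/mist_train_cf/cf_3625/solution.py | sort_even_numbers
-- ===== SOURCE A (Python) =====
-- def sort_even_numbers(lst):
--     """
--     This function takes a list of integers, removes any duplicate even numbers,
--     sorts the remaining even numbers in ascending order, and returns the sorted list.
--
--     Args:
--     lst (list): A list of integers.
--
--     Returns:
--     list: A sorted list of even numbers.
--     """
--     even_numbers = []
--     for num in lst:
--         if num % 2 == 0 and num not in even_numbers:
--             even_numbers.append(num)
--     for i in range(len(even_numbers)):
--         for j in range(len(even_numbers) - 1):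
--             if even_numbers[j] > even_numbers[j + 1]:
--                 even_numbers[j], even_numbers[j + 1] = even_numbers[j + 1], even_numbers[j]
--     return even_numbers
-- ===== SOURCE B (Python) =====
-- def sort_even_numbers(lst):
--     evens = sorted(x for x in lst if x % 2 == 0)
--     result = []
--     for x in evens:
--         if not result or result[-1] != x:
--             result.append(x)
--     return result
-- ===== Notes on version B (the rewrite author's own statement) =====
-- stated objective: faster
-- what changed: Replaces A's linear-membership dedup plus hand-written bubble sort with a library sort of the evens followed by one linear pass collapsing adjacent duplicates.
import Mathlib
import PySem

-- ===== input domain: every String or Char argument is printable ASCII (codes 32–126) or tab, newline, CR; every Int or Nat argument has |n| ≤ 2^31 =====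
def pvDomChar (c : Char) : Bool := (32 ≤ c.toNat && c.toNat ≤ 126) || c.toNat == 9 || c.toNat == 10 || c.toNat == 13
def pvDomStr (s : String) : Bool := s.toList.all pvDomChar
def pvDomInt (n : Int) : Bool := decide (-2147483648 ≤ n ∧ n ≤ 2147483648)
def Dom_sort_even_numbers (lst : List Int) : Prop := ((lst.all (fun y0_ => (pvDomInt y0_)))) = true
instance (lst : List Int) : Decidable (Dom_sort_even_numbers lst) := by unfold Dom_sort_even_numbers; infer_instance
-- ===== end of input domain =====

-- B sorts the even elements with the library sort and removes duplicates in one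
-- adjacent-comparison pass, replacing A's membership-test dedup + bubble sort (objective: faster).


-- ===== PORT A =====
-- one inner bubble pass `for j in range(len-1): if a[j] > a[j+1]: swap` as the
-- standard structural recursion over the list (the same adjacent comparisons and
-- swaps, in the same order)
def pvBubblePass : List Int → List Int
  | x :: y :: rest =>
    if y < x then y :: pvBubblePass (x :: rest) else x :: pvBubblePass (y :: rest)
  | l => l

-- the outer loop `for i in range(len(even_numbers))`: n passes
def pvPasses : Nat → List Int → List Int
  | 0, l => l
  | n + 1, l => pvPasses n (pvBubblePass l)

def sort_even_numbers (lst : List Int) : List Int :=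
  let even_numbers := lst.foldl
    (fun acc num => if PySem.Int.mod num 2 == 0 && !(acc.contains num) then acc ++ [num] else acc) []
  pvPasses even_numbers.length even_numbers

-- ===== PORT B =====
-- `if not result or result[-1] != x` is exactly `result.getLast? ≠ some x`
def sort_even_numbers_alt (lst : List Int) : List Int :=
  let evens := PySem.List.sorted (lst.filter (fun x => PySem.Int.mod x 2 == 0)) (fun x => x) false
  evens.foldl (fun res x => if res.getLast? ≠ some x then res ++ [x] else res) []

-- ===== PRECONDITION & SPEC =====
def Spec_sort_even_numbers (lst : List Int) (out : List Int) : Prop := out = sort_even_numbers_alt lst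
instance (lst : List Int) (out : List Int) : Decidable (Spec_sort_even_numbers lst out) := by unfold Spec_sort_even_numbers; infer_instance

-- ===== CLAIM (what is proved, stated in full; the proofs are below) =====
def Claim_equal_sort_even_numbers : Prop := ∀ (lst : List Int), Dom_sort_even_numbers lst → Spec_sort_even_numbers lst (sort_even_numbers lst)

-- ===== LEMMAS AND PROOFS =====

theorem pass_perm (l : List Int) : (pvBubblePass l).Perm l := by
  induction l using pvBubblePass.induct with
  | case1 x y rest h ih =>
      simp only [pvBubblePass, if_pos h]
      exact (ih.cons y).trans (List.Perm.swap x y rest)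
  | case2 x y rest h ih =>
      simp only [pvBubblePass, if_neg h]
      exact ih.cons x
  | case3 l h =>
      cases l with
      | nil => simp [pvBubblePass]
      | cons a t =>
        cases t with
        | nil => simp [pvBubblePass]
        | cons b r => exact absurd rfl (h a b r)

theorem passes_perm (n : Nat) (l : List Int) : (pvPasses n l).Perm l := by
  induction n generalizing l with
  | zero => exact List.Perm.refl l
  | succ n ih => exact (ih (pvBubblePass l)).trans (pass_perm l)

theorem pass_decomp (x : Int) (t : List Int) :
    ∃ init m, pvBubblePass (x :: t) = init ++ [m] ∧ init.length = t.length ∧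
      ∀ a ∈ x :: t, a ≤ m := by
  induction t generalizing x with
  | nil =>
      refine ⟨[], x, by simp [pvBubblePass], rfl, ?_⟩
      intro a ha; simp at ha; omega
  | cons y rest ih =>
      by_cases h : y < x
      · obtain ⟨init', m', heq, hlen, hb⟩ := ih x
        refine ⟨y :: init', m', ?_, by simp [hlen], ?_⟩
        · simp [pvBubblePass, if_pos h, heq]
        · intro a ha
          simp only [List.mem_cons] at ha
          rcases ha with rfl | rfl | ha
          · exact hb a (by simp)
          · have := hb x (by simp); omega
          · exact hb a (by simp [ha])
      · obtain ⟨init', m', heq, hlen, hb⟩ := ih y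
        refine ⟨x :: init', m', ?_, by simp [hlen], ?_⟩
        · simp [pvBubblePass, if_neg h, heq]
        · intro a ha
          simp only [List.mem_cons] at ha
          rcases ha with rfl | rfl | ha
          · have := hb y (by simp); omega
          · exact hb a (by simp)
          · exact hb a (by simp [ha])

theorem pass_append (n : Nat) (init : List Int) (m : Int) (hlen : init.length ≤ n)
    (h : ∀ a ∈ init, a ≤ m) :
    pvBubblePass (init ++ [m]) = pvBubblePass init ++ [m] := by
  induction n generalizing init with
  | zero =>
      have : init = [] := by
        cases init with
        | nil => rfl
        | cons a t => simp at hlen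
      subst this; simp [pvBubblePass]
  | succ n ih =>
      match init with
      | [] => simp [pvBubblePass]
      | [a] =>
          have ha : a ≤ m := h a (by simp)
          have : ¬ m < a := by omega
          simp [pvBubblePass, if_neg this]
      | a :: b :: t =>
          by_cases hba : b < a
          · have : pvBubblePass (a :: b :: t ++ [m]) = b :: pvBubblePass (a :: t ++ [m]) := by
              simp [pvBubblePass, if_pos hba]
            rw [this, ih (a :: t) (by simp at hlen ⊢; omega)
              (by intro c hc; simp only [List.mem_cons] at hc
                  rcases hc with rfl | hc
                  · exact h c (by simp)
                  · exact h c (by simp [hc]))]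
            simp [pvBubblePass, if_pos hba]
          · have : pvBubblePass (a :: b :: t ++ [m]) = a :: pvBubblePass (b :: t ++ [m]) := by
              simp [pvBubblePass, if_neg hba]
            rw [this, ih (b :: t) (by simp at hlen ⊢; omega)
              (by intro c hc; simp only [List.mem_cons] at hc
                  rcases hc with rfl | hc
                  · exact h c (by simp)
                  · exact h c (by simp [hc]))]
            simp [pvBubblePass, if_neg hba]

theorem passes_append (n : Nat) (init : List Int) (m : Int) (h : ∀ a ∈ init, a ≤ m) :
    pvPasses n (init ++ [m]) = pvPasses n init ++ [m] := by
  induction n generalizing init with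
  | zero => rfl
  | succ n ih =>
      have h1 : pvBubblePass (init ++ [m]) = pvBubblePass init ++ [m] :=
        pass_append init.length init m le_rfl h
      have h2 : ∀ a ∈ pvBubblePass init, a ≤ m := by
        intro a ha; exact h a ((pass_perm init).mem_iff.mp ha)
      show pvPasses n (pvBubblePass (init ++ [m])) = pvPasses n (pvBubblePass init) ++ [m]
      rw [h1, ih (pvBubblePass init) h2]

theorem passes_sorted (n : Nat) (l : List Int) (hlen : l.length ≤ n) :
    (pvPasses n l).Pairwise (· ≤ ·) := by
  induction n generalizing l with
  | zero =>
      have : l = [] := by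
        cases l with
        | nil => rfl
        | cons a t => simp at hlen
      subst this; exact List.Pairwise.nil
  | succ n ih =>
      cases l with
      | nil =>
          have hnil : ∀ k, pvPasses k ([] : List Int) = [] := by
            intro k; induction k with
            | zero => rfl
            | succ k ihk =>
                show pvPasses k (pvBubblePass []) = []
                rw [show pvBubblePass [] = [] from by simp [pvBubblePass]]
                exact ihk
          show (pvPasses n (pvBubblePass [])).Pairwise (· ≤ ·)
          rw [show pvBubblePass [] = [] from by simp [pvBubblePass], hnil n]
          exact List.Pairwise.nil
      | cons x t =>
          obtain ⟨init, m, heq, hl, hb⟩ := pass_decomp x t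
          have hbi : ∀ a ∈ init, a ≤ m := by
            intro a ha
            exact hb a ((pass_perm (x :: t)).mem_iff.mp (by simp [heq, ha]))
          show (pvPasses n (pvBubblePass (x :: t))).Pairwise (· ≤ ·)
          rw [heq, passes_append n init m hbi]
          have hs : (pvPasses n init).Pairwise (· ≤ ·) := by
            apply ih; simp at hlen; omega
          rw [List.pairwise_append]
          refine ⟨hs, by simp, ?_⟩
          intro a ha b hbm
          simp at hbm; subst hbm
          exact hbi a ((passes_perm n init).mem_iff.mp ha)

theorem dedup_inv (p : Int → Bool) (l acc : List Int) (hnd : acc.Nodup) :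
    (l.foldl (fun acc num => if p num && !(acc.contains num) then acc ++ [num] else acc) acc).Nodup ∧
    (∀ x, x ∈ l.foldl (fun acc num => if p num && !(acc.contains num) then acc ++ [num] else acc) acc ↔
      x ∈ acc ∨ (x ∈ l ∧ p x = true)) := by
  induction l generalizing acc with
  | nil => simpa using hnd
  | cons num t ih =>
      simp only [List.foldl_cons]
      by_cases hc : (p num && !(acc.contains num)) = true
      · have hnd' : (acc ++ [num]).Nodup := by
          simp at hc
          simp [List.nodup_append, hnd]
          intro a ha h
          exact hc.2 (h ▸ ha)
        obtain ⟨h1, h2⟩ := ih (acc ++ [num]) hnd'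
        rw [if_pos hc]
        refine ⟨h1, ?_⟩
        intro x
        rw [h2 x]
        simp at hc ⊢
        constructor
        · rintro ((hx | hx) | hx)
          · exact Or.inl hx
          · exact Or.inr ⟨Or.inl hx, hx ▸ hc.1⟩
          · exact Or.inr ⟨Or.inr hx.1, hx.2⟩
        · rintro (hx | ⟨hx | hx, hp⟩)
          · exact Or.inl (Or.inl hx)
          · exact Or.inl (Or.inr hx)
          · exact Or.inr ⟨hx, hp⟩
      · obtain ⟨h1, h2⟩ := ih acc hnd
        rw [if_neg hc]
        refine ⟨h1, ?_⟩
        intro x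
        rw [h2 x]
        simp at hc ⊢
        constructor
        · rintro (hx | hx)
          · exact Or.inl hx
          · exact Or.inr ⟨Or.inr hx.1, hx.2⟩
        · rintro (hx | ⟨hx | hx, hp⟩)
          · exact Or.inl hx
          · subst hx
            exact Or.inl (hc hp)
          · exact Or.inr ⟨hx, hp⟩

theorem le_getLast (acc : List Int) (hp : acc.Pairwise (· < ·)) (a : Int) (ha : a ∈ acc)
    (y : Int) (hy : acc.getLast? = some y) : a ≤ y := by
  induction acc with
  | nil => simp at ha
  | cons c cs ih =>
      rw [List.pairwise_cons] at hp
      cases cs with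
      | nil =>
          simp at ha hy; omega
      | cons d ds =>
          have hy' : (d :: ds).getLast? = some y := by
            simpa using hy
          have hym : y ∈ d :: ds := by
            have := List.getLast?_eq_some_iff.mp hy'
            obtain ⟨l', hl'⟩ := this
            simp [hl']
          rcases List.mem_cons.mp ha with rfl | ha'
          · have := hp.1 y hym; omega
          · exact ih hp.2 ha' hy'

theorem adj_inv (xs acc : List Int) (hxs : xs.Pairwise (· ≤ ·)) (hacc : acc.Pairwise (· < ·))
    (hb : ∀ a ∈ acc, ∀ b ∈ xs, a ≤ b) :
    (xs.foldl (fun res x => if res.getLast? ≠ some x then res ++ [x] else res) acc).Pairwise (· < ·) ∧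
    (∀ x, x ∈ xs.foldl (fun res x => if res.getLast? ≠ some x then res ++ [x] else res) acc ↔
      x ∈ acc ∨ x ∈ xs) := by
  induction xs generalizing acc with
  | nil => exact ⟨hacc, by simp⟩
  | cons b t ih =>
      rw [List.pairwise_cons] at hxs
      simp only [List.foldl_cons]
      by_cases hlast : acc.getLast? = some b
      · rw [if_neg (by simp [hlast])]
        have hbmem : b ∈ acc := by
          obtain ⟨l', hl'⟩ := List.getLast?_eq_some_iff.mp hlast
          simp [hl']
        obtain ⟨h1, h2⟩ := ih acc hxs.2 hacc
          (by intro a ha c hc; exact hb a ha c (by simp [hc]))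
        refine ⟨h1, ?_⟩
        intro x
        rw [h2 x]
        constructor
        · rintro (hx | hx)
          · exact Or.inl hx
          · exact Or.inr (by simp [hx])
        · rintro (hx | hx)
          · exact Or.inl hx
          · rcases (by simpa using hx : x = b ∨ x ∈ t) with hx | hx
            · exact Or.inl (hx ▸ hbmem)
            · exact Or.inr hx
      · rw [if_pos (by simp [hlast])]
        have hacc' : (acc ++ [b]).Pairwise (· < ·) := by
          rw [List.pairwise_append]
          refine ⟨hacc, by simp, ?_⟩
          intro a ha c hc
          simp only [List.mem_singleton] at hc
          rw [hc]
          cases hgl : acc.getLast? with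
          | none =>
              simp [List.getLast?_eq_none_iff] at hgl
              subst hgl; simp at ha
          | some y =>
              have hy : a ≤ y := le_getLast acc hacc a ha y hgl
              have hym : y ∈ acc := by
                obtain ⟨l', hl'⟩ := List.getLast?_eq_some_iff.mp hgl
                simp [hl']
              have hyb : y ≤ b := hb y hym b (by simp)
              have : y ≠ b := by
                intro hcon; exact hlast (hcon ▸ hgl)
              omega
        obtain ⟨h1, h2⟩ := ih (acc ++ [b]) hxs.2 hacc'
          (by intro a ha c hc
              rcases (by simpa using ha : a ∈ acc ∨ a = b) with ha | ha
              · exact hb a ha c (by simp [hc])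
              · exact ha ▸ hxs.1 c hc)
        refine ⟨h1, ?_⟩
        intro x
        rw [h2 x]
        simp
        tauto

-- ===== VERDICT (by name: the statement is the Claim_ definition above) =====
theorem sort_even_numbers_spec : Claim_equal_sort_even_numbers := by
  intro lst _
  unfold Spec_sort_even_numbers sort_even_numbers sort_even_numbers_alt
  simp only []
  obtain ⟨hend, hemem⟩ :=
    dedup_inv (fun x => PySem.Int.mod x 2 == 0) lst [] List.nodup_nil
  set E := lst.foldl
    (fun acc num => if (PySem.Int.mod num 2 == 0 && !(acc.contains num)) = true
      then acc ++ [num] else acc) [] with hE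
  set Ra := pvPasses E.length E with hRa
  set evens := PySem.List.sorted
    (lst.filter (fun x => PySem.Int.mod x 2 == 0)) (fun x => x) false with hevens
  set Rb := evens.foldl (fun res x => if res.getLast? ≠ some x then res ++ [x] else res) []
    with hRb
  -- A's result: a strictly increasing rearrangement of E
  have hperm : Ra.Perm E := passes_perm E.length E
  have hle : Ra.Pairwise (· ≤ ·) := passes_sorted E.length E le_rfl
  have hndRa : Ra.Nodup := hperm.nodup_iff.mpr hend
  have hltRa : Ra.Pairwise (· < ·) :=
    (hle.and hndRa).imp (fun h => lt_of_le_of_ne h.1 h.2)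
  -- B's result: a strictly increasing list with the same members as E
  have hsorte : evens.Pairwise (· ≤ ·) := by
    exact PySem.List.sorted_pairwise
      (lst.filter (fun x => PySem.Int.mod x 2 == 0)) (fun x => x)
  obtain ⟨hltRb, hmemRb⟩ := adj_inv evens [] hsorte List.Pairwise.nil (by simp)
  have hndRb : Rb.Nodup := hltRb.imp (fun h => ne_of_lt h)
  have hmem : ∀ x, x ∈ Rb ↔ x ∈ E := by
    intro x
    rw [hmemRb x, hemem x]
    simp [hevens, PySem.List.mem_sorted, List.mem_filter]
  have hpermRb : Rb.Perm E := (List.perm_ext_iff_of_nodup hndRb hend).mpr hmem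
  have h1 : PySem.List.sorted E (fun x => x) false = Ra :=
    PySem.List.sorted_eq_of_perm_of_pairwise_lt E Ra (fun x => x) hperm hltRa
  have h2 : PySem.List.sorted E (fun x => x) false = Rb :=
    PySem.List.sorted_eq_of_perm_of_pairwise_lt E Rb (fun x => x) hpermRb hltRb
  exact h1 ▸ h2
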